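-- pv_equiv track=rewrite | github.com/MrBrantCode/unitest_baseline | mut_generate/mist_train_cf/cf_19733/solution.py | is_reversed
-- ===== SOURCE A (Python) =====
-- def is_reversed(string_1, string_2):
--     if len(string_1) != len(string_2):
--         return False
--     length = len(string_1)
--     for i in range(length):
--         if string_1[i] != string_2[length - i - 1]:
--             return False
--     return True
-- ===== SOURCE B (Python) =====
-- def is_reversed(string_1, string_2):
--     # Reverse string_1 with an explicit stack (push all, then pop all),
--     # then compare the rebuilt string against string_2.
--     stack = []
--     for c in string_1:
--         stack.append(c)
--     out = []
--     while stack: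
--         out.append(stack.pop())
--     return ''.join(out) == string_2
-- ===== Notes on version B (the rewrite author's own statement) =====
-- stated objective: alternative
-- what changed: Replaces the length guard plus two-ended index loop with a stack: push every character of string_1, pop them all to rebuild string_1 reversed, and compare that string to string_2 in one equality; no indexing and no length check remain.
import Mathlib
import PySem

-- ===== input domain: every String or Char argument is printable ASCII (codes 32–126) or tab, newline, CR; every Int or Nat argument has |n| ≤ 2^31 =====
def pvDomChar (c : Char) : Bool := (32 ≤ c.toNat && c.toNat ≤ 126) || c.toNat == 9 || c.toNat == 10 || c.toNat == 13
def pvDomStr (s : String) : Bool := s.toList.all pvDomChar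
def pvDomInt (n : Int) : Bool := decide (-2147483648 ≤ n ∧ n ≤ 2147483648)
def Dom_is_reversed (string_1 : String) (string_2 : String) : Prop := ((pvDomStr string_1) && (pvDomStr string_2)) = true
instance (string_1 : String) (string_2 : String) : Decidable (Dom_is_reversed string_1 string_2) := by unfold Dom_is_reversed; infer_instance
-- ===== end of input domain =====

-- B replaces A's length guard + two-ended index loop by an explicit stack: push all of
-- string_1, pop it all to rebuild string_1 reversed, and compare that to string_2 (alternative).

-- ===== PORT A =====
def is_reversed (string_1 : String) (string_2 : String) : Bool :=
  let l1 := string_1.toList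
  let l2 := string_2.toList
  if l1.length ≠ l2.length then false
  else
    let length := l1.length
    -- for i in range(length): if string_1[i] != string_2[length-i-1]: return False / return True
    (PySem.List.pyRange 0 (length : Int) 1).all
      (fun i => PySem.List.pyGet? l1 i == PySem.List.pyGet? l2 ((length : Int) - i - 1))

-- ===== PORT B =====
-- while stack: out.append(stack.pop())
def popAllLoop : List Char → List Char → List Char
  | [], out => out
  | (c :: cs), out =>
      popAllLoop (c :: cs).dropLast (out ++ [(c :: cs).getLast (by simp)])
termination_by stack _ => stack.length
decreasing_by simp

def is_reversed_alt (string_1 : String) (string_2 : String) : Bool :=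
  -- stack = []; for c in string_1: stack.append(c)
  let stack := string_1.toList.foldl (fun st c => st ++ [c]) []
  -- out = []; while stack: out.append(stack.pop())
  let out := popAllLoop stack []
  -- ''.join(out) == string_2
  String.ofList out == string_2

-- ===== PRECONDITION & SPEC =====
def Spec_is_reversed (string_1 : String) (string_2 : String) (out : Bool) : Prop := out = is_reversed_alt string_1 string_2
instance (string_1 : String) (string_2 : String) (out : Bool) : Decidable (Spec_is_reversed string_1 string_2 out) := by unfold Spec_is_reversed; infer_instance

-- ===== CLAIM (what is proved, stated in full; the proofs are below) =====
def Claim_equal_is_reversed : Prop := ∀ (string_1 : String) (string_2 : String), Dom_is_reversed string_1 string_2 → Spec_is_reversed string_1 string_2 (is_reversed string_1 string_2)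

-- ===== LEMMAS AND PROOFS =====

-- pushing every element onto the stack rebuilds the list
theorem foldl_push (l acc : List Char) :
    l.foldl (fun st c => st ++ [c]) acc = acc ++ l := by
  induction l generalizing acc with
  | nil => simp
  | cons c cs ih => simp [List.foldl_cons, ih]

-- popping the whole stack appends its reversal to the output
theorem popAllLoop_eq (st out : List Char) : popAllLoop st out = out ++ st.reverse := by
  induction st using List.reverseRecOn generalizing out with
  | nil => simp [popAllLoop]
  | append_singleton ys y ih =>
      cases ys with
      | nil => simp [popAllLoop]
      | cons z zs =>
          rw [show (z :: zs) ++ [y] = z :: (zs ++ [y]) by simp, popAllLoop]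
          simp only [show z :: (zs ++ [y]) = (z :: zs) ++ [y] by simp]
          rw [List.dropLast_concat, List.getLast_append_singleton, ih]
          simp

theorem is_reversed_alt_eq (s1 s2 : String) :
    is_reversed_alt s1 s2 = decide (s1.toList.reverse = s2.toList) := by
  simp only [is_reversed_alt, foldl_push, popAllLoop_eq, List.nil_append]
  rw [Bool.eq_iff_iff, beq_iff_eq, decide_eq_true_iff]
  constructor
  · intro hmk; rw [← hmk, String.toList_ofList]
  · intro hl; rw [hl, String.ofList_toList]

-- A's two-ended scan, as a proposition
theorem scan_true_iff (l1 l2 : List Char) (h : l1.length = l2.length) :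
    ((PySem.List.pyRange 0 (l1.length : Int) 1).all
      (fun i => PySem.List.pyGet? l1 i == PySem.List.pyGet? l2 ((l1.length : Int) - i - 1)) = true)
    ↔ l1.reverse = l2 := by
  rw [List.all_eq_true]
  have key : ∀ (hall : ∀ x ∈ PySem.List.pyRange 0 (l1.length : Int) 1,
        (PySem.List.pyGet? l1 x == PySem.List.pyGet? l2 ((l1.length : Int) - x - 1)) = true)
      (k : Nat) (hk : k < l1.length),
      l1[k]'hk = l2[l1.length - 1 - k]'(by omega) := by
    intro hall k hk
    have hmem : ((k : Nat) : Int) ∈ PySem.List.pyRange 0 (l1.length : Int) 1 := by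
      rw [PySem.List.mem_pyRange_one]; constructor <;> [positivity; exact_mod_cast hk]
    have hcast : ((l1.length : Int) - (k : Int) - 1) = ((l1.length - 1 - k : Nat) : Int) := by omega
    have := hall _ hmem
    rw [hcast, PySem.List.pyGet?_natCast, PySem.List.pyGet?_natCast,
        List.getElem?_eq_getElem hk, List.getElem?_eq_getElem (by omega)] at this
    simpa using this
  constructor
  · intro hall
    apply List.ext_getElem (by simp [h])
    intro k hk1 hk2
    have hk : k < l1.length := by simpa using hk1
    rw [List.getElem_reverse]
    have := key hall (l1.length - 1 - k) (by omega)
    have hidx : l1.length - 1 - (l1.length - 1 - k) = k := by omega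
    simp only [hidx] at this
    exact this
  · intro hrev i hi
    rw [PySem.List.mem_pyRange_one] at hi
    have hk : i.toNat < l1.length := by omega
    have hi' : i = ((i.toNat : Nat) : Int) := by omega
    have hcast : ((l1.length : Int) - i - 1) = ((l1.length - 1 - i.toNat : Nat) : Int) := by omega
    rw [hcast, hi', PySem.List.pyGet?_natCast, PySem.List.pyGet?_natCast,
        List.getElem?_eq_getElem hk, List.getElem?_eq_getElem (by omega)]
    simp only [Option.some.injEq, beq_iff_eq, Int.toNat_natCast]
    have : l2[l1.length - 1 - i.toNat]'(by omega) = l1.reverse[l1.length - 1 - i.toNat]'(by simp; omega) := by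
      simp only [hrev]
    rw [this, List.getElem_reverse]
    congr 1
    omega

-- ===== VERDICT (by name: the statement is the Claim_ definition above) =====
theorem is_reversed_spec : Claim_equal_is_reversed := by
  intro s1 s2 _
  unfold Spec_is_reversed
  rw [is_reversed_alt_eq]
  unfold is_reversed
  by_cases h : s1.toList.length = s2.toList.length
  · rw [if_neg (not_not_intro h)]
    rw [Bool.eq_iff_iff, scan_true_iff _ _ h, decide_eq_true_iff]
  · rw [if_pos h]
    have hne : ¬ (s1.toList.reverse = s2.toList) := by
      intro hc; apply h; rw [← hc]; simp
    simp [hne]
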